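-- pv_equiv track=rewrite | github.com/heitor57/poi-rss | algorithms/lib/geocat/cat_utils.py | get_most_detailed_categories
-- ===== SOURCE A (Python) =====
-- def get_most_detailed_categories(categories,dict_alias_title,dict_alias_depth):
--     max_height=0
--     for category in categories:
--         max_height = max(dict_alias_depth[category],max_height)
--     new_categories=list()
--     for category in categories:
--         height=dict_alias_depth[category]
--         if(height == max_height):
--             new_categories.append(category)
--     return new_categories
-- ===== SOURCE B (Python) =====
-- def get_most_detailed_categories(categories, dict_alias_title, dict_alias_depth):
--     groups = {}
--     for category in categories:
--         groups.setdefault(dict_alias_depth[category], []).append(category)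
--     best = max(max(groups, default=0), 0)
--     return groups.get(best, [])
-- ===== Notes on version B (the rewrite author's own statement) =====
-- stated objective: alternative
-- what changed: B buckets the categories by depth into a dict {depth: [categories]} in one pass and then returns the bucket of the maximal key (floored at 0, matching A's max_height=0 start), instead of A's running-max pass followed by a filter pass.
import Mathlib
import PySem

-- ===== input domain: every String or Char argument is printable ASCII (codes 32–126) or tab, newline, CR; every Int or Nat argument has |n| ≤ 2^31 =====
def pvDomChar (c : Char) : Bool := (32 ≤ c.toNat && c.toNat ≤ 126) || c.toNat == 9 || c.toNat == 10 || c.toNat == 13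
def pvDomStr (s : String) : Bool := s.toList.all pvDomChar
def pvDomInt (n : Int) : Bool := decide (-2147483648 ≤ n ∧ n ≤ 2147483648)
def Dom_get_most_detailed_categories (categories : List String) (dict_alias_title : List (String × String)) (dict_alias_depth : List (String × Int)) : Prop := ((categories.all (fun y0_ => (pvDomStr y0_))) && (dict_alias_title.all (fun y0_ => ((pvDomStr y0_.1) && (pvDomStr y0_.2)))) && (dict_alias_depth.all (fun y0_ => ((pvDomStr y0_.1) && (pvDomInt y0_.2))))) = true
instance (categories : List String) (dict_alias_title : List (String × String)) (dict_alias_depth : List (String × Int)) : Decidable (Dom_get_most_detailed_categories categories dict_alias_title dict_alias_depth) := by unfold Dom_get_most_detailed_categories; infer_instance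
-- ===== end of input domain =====

-- B buckets the categories by depth into a dict {depth: [categories]} in one pass and returns the
-- bucket of the maximal key (floored at 0, matching A's max_height=0 start), instead of A's
-- running-max pass followed by a filter pass.  Equivalence is claimed under Pre_ (every category is
-- a key of the depth dict; both Pythons raise KeyError otherwise).

-- ===== PORT A =====
-- dict_alias_depth[category]: under Pre_ the key is present, so the total getD-form is exact.
def get_most_detailed_categories (categories : List String) (dict_alias_title : List (String × String)) (dict_alias_depth : List (String × Int)) : List String :=
  let dd := PySem.Dict.ofList dict_alias_depth
  let max_height := categories.foldl (fun max_height category => max (dd.getD category 0) max_height) 0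
  categories.foldl (fun new_categories category =>
    let height := dd.getD category 0
    if height == max_height then new_categories ++ [category] else new_categories) []

-- ===== PORT B =====
-- groups.setdefault(h, []).append(c) is Dict.modify h [] (· ++ [c]); max(groups, default=0) is
-- PySem.List.maxD over the keys; groups.get(best, []) is Dict.getD.
def get_most_detailed_categories_alt (categories : List String) (dict_alias_title : List (String × String)) (dict_alias_depth : List (String × Int)) : List String :=
  let dd := PySem.Dict.ofList dict_alias_depth
  let groups := categories.foldl
    (fun (g : PySem.Dict Int (List String)) category =>
      g.modify (dd.getD category 0) [] (fun bucket => bucket ++ [category]))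
    PySem.Dict.empty
  let best := max (PySem.List.maxD groups.keys (fun k => k) 0) 0
  groups.getD best []

-- ===== PRECONDITION & SPEC =====
-- Pre_: every category occurs as a key of dict_alias_depth — exactly where both Pythons return
-- (a missing key raises KeyError in A and in B).
def Pre_get_most_detailed_categories (categories : List String) (dict_alias_title : List (String × String)) (dict_alias_depth : List (String × Int)) : Prop :=
  ∀ c ∈ categories, ((PySem.Dict.ofList dict_alias_depth).contains c) = true
instance (categories : List String) (dict_alias_title : List (String × String)) (dict_alias_depth : List (String × Int)) : Decidable (Pre_get_most_detailed_categories categories dict_alias_title dict_alias_depth) := by unfold Pre_get_most_detailed_categories; infer_instance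

def pvWitness_get_most_detailed_categories : List String × (List (String × String)) × (List (String × Int)) :=
  (["a", "b", "a"], [("a", "Art")], [("a", 2), ("b", 3)])

def Spec_get_most_detailed_categories (categories : List String) (dict_alias_title : List (String × String)) (dict_alias_depth : List (String × Int)) (out : List String) : Prop := out = get_most_detailed_categories_alt categories dict_alias_title dict_alias_depth
instance (categories : List String) (dict_alias_title : List (String × String)) (dict_alias_depth : List (String × Int)) (out : List String) : Decidable (Spec_get_most_detailed_categories categories dict_alias_title dict_alias_depth out) := by unfold Spec_get_most_detailed_categories; infer_instance

-- ===== CLAIM (what is proved, stated in full; the proofs are below) =====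
def Claim_equal_get_most_detailed_categories : Prop := ∀ (categories : List String) (dict_alias_title : List (String × String)) (dict_alias_depth : List (String × Int)), Dom_get_most_detailed_categories categories dict_alias_title dict_alias_depth → Pre_get_most_detailed_categories categories dict_alias_title dict_alias_depth → Spec_get_most_detailed_categories categories dict_alias_title dict_alias_depth (get_most_detailed_categories categories dict_alias_title dict_alias_depth)

-- ===== LEMMAS AND PROOFS =====

-- Any bucket of B's grouping dict is the filter of the categories at that depth
-- (cites PySem.Dict.getD_foldl_modify_append after pulling the key map out of the fold).
theorem bucket_eq_filter (d : String → Int) (xs : List String) (M : Int) :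
    (xs.foldl (fun (g : PySem.Dict Int (List String)) c =>
        g.modify (d c) [] (fun bucket => bucket ++ [c])) PySem.Dict.empty).getD M []
      = xs.filter (fun c => d c == M) := by
  have h : xs.foldl (fun (g : PySem.Dict Int (List String)) c =>
        g.modify (d c) [] (fun bucket => bucket ++ [c])) PySem.Dict.empty
      = (xs.map (fun c => (d c, c))).foldl
          (fun (g : PySem.Dict Int (List String)) p =>
            g.modify p.1 [] (fun bucket => bucket ++ [p.2])) PySem.Dict.empty := by
    rw [List.foldl_map]
  rw [h, PySem.Dict.getD_foldl_modify_append]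
  simp [Function.comp_def, List.filter_map]

-- The keys of B's grouping dict are the distinct depths (cites PySem.Dict.keys_foldl_modify_key).
theorem keys_eq_set (d : String → Int) (xs : List String) :
    (xs.foldl (fun (g : PySem.Dict Int (List String)) c =>
        g.modify (d c) [] (fun bucket => bucket ++ [c])) PySem.Dict.empty).keys
      = PySem.Set.ofList (xs.map d) := by
  rw [PySem.Dict.keys_foldl_modify_key xs d [] (fun _ c bucket => bucket ++ [c])]
  rfl

-- B's floored maximum over the distinct depths equals A's running maximum started at 0.
theorem best_eq_max (d : String → Int) (xs : List String) :
    max (PySem.List.maxD (PySem.Set.ofList (xs.map d)) (fun k => k) 0) 0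
      = xs.foldl (fun acc c => max (d c) acc) 0 := by
  have hA : xs.foldl (fun acc c => max (d c) acc) 0 = (xs.map d).foldl max 0 := by
    rw [List.foldl_map]
    exact PySem.List.foldl_congr_mem xs (fun acc c => max (d c) acc) (fun acc c => max acc (d c)) 0 (fun acc c _ => max_comm (d c) acc)
  rw [hA]
  have h0 : (0 : Int) ≤ (xs.map d).foldl max 0 := (PySem.List.le_foldl_max (xs.map d) 0).1
  have hub : ∀ y ∈ xs.map d, y ≤ (xs.map d).foldl max 0 := (PySem.List.le_foldl_max (xs.map d) 0).2
  have hmem := PySem.List.foldl_max_mem (xs.map d) 0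
  unfold PySem.List.maxD
  cases hm : PySem.List.max? (PySem.Set.ofList (xs.map d)) (fun k => k) with
  | none =>
    have hnil : PySem.Set.ofList (xs.map d) = [] := (PySem.List.max?_eq_none_iff _ _).mp hm
    have hxs : xs.map d = [] := by
      cases hxs : xs.map d with
      | nil => rfl
      | cons y ys =>
        exfalso
        have : y ∈ PySem.Set.ofList (xs.map d) := (PySem.Set.mem_ofList _ _).mpr (by rw [hxs]; exact List.mem_cons_self ..)
        rw [hnil] at this; exact (List.not_mem_nil) this
    rw [hxs]; simp
  | some m =>
    have hmmem : m ∈ xs.map d := (PySem.Set.mem_ofList _ _).mp (PySem.List.max?_mem hm)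
    have hmax : ∀ y ∈ xs.map d, y ≤ m := fun y hy =>
      PySem.List.max?_isMax hm y ((PySem.Set.mem_ofList _ _).mpr hy)
    simp only [Option.getD_some]
    have h1 : m ≤ (xs.map d).foldl max 0 := hub m hmmem
    have h2 : (xs.map d).foldl max 0 ≤ max m 0 := by
      rcases hmem with h | h
      · omega
      · have := hmax _ h; omega
    omega

-- A's second loop is a filter (cites the PySem loop-shape lemma).
theorem aFilter (d : String → Int) (M : Int) (xs : List String) :
    xs.foldl (fun acc c => if d c == M then acc ++ [c] else acc) []
      = xs.filter (fun c => d c == M) := by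
  have := PySem.List.foldl_append_if_eq_filter (l := xs) (p := fun c => d c == M) (acc := ([] : List String))
  simpa using this

-- ===== VERDICT (by name: the statement is the Claim_ definition above) =====
theorem get_most_detailed_categories_spec : Claim_equal_get_most_detailed_categories := by
  intro categories dict_alias_title dict_alias_depth _hDom _hPre
  unfold Spec_get_most_detailed_categories get_most_detailed_categories get_most_detailed_categories_alt
  simp only
  rw [aFilter (fun c => (PySem.Dict.ofList dict_alias_depth).getD c 0),
      bucket_eq_filter (fun c => (PySem.Dict.ofList dict_alias_depth).getD c 0),
      keys_eq_set (fun c => (PySem.Dict.ofList dict_alias_depth).getD c 0),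
      best_eq_max (fun c => (PySem.Dict.ofList dict_alias_depth).getD c 0)]
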